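-- pv_equiv track=rewrite | github.com/BurritoFreak/BurritoAdventOfCode2024 | Day 3/Day3.py | check_first_four_characters
-- ===== SOURCE A (Python) =====
-- def check_first_four_characters(terms):
--     results = []
--     addToList = True
--     for term in terms:
--         if term[:4] == "do()":
--             addToList = True
--         elif term[:5] == "don't":
--             addToList = False
--         if term[:3] == "mul" and addToList:
--             results.append(term)
--     return results
-- ===== SOURCE B (Python) =====
-- def _split_at_toggle(rest):
--     """Return (chunk, remainder) where chunk is the run of non-toggle terms
--     and remainder starts at the first do()/don't toggle (or is empty)."""
--     for i, t in enumerate(rest):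
--         if t[:4] == "do()" or t[:5] == "don't":
--             return rest[:i], rest[i:]
--     return rest, []
--
--
-- def check_first_four_characters(terms):
--     # Segment-skipping: cut the input into runs separated by toggles; keep the
--     # mul terms of a run only when the preceding toggle was do() (initially on),
--     # discarding inactive runs wholesale without per-term flag bookkeeping.
--     out = []
--     active = True
--     rest = terms
--     while True:
--         chunk, rest = _split_at_toggle(rest)
--         if active:
--             out.extend(t for t in chunk if t[:3] == "mul")
--         if not rest:
--             return out
--         active = rest[0][:4] == "do()"
--         rest = rest[1:]
-- ===== Notes on version B (the rewrite author's own statement) =====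
-- stated objective: alternative
-- what changed: Replaces A's per-term mutable-flag loop by a segment-skipping algorithm: a helper cuts the input at the next do()/don't toggle, whole inactive segments are discarded without inspecting their terms' flags, and active segments are mul-filtered in bulk.
import Mathlib
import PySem

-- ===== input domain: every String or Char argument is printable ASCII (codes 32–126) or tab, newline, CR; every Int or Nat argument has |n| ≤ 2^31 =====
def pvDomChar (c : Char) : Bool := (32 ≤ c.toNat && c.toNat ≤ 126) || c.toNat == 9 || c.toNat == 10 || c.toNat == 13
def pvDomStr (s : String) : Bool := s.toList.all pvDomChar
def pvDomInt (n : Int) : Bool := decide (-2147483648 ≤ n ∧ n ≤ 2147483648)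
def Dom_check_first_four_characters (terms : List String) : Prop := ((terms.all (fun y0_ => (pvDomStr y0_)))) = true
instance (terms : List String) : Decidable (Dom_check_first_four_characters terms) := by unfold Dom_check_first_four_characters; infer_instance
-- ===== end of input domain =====

-- B replaces A's per-term flag loop by a segment-skipping decomposition (split at toggles, bulk-filter active segments); alternative, same cost.


-- ===== PORT A =====
-- fused loop: state (results, addToList), appending inside the loop
def pvAStep (st : List String × Bool) (term : String) : List String × Bool :=
  let addToList : Bool :=
    if PySem.Str.slice term none (some 4) = "do()" then true
    else if PySem.Str.slice term none (some 5) = "don't" then false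
    else st.2
  if PySem.Str.slice term none (some 3) = "mul" ∧ addToList = true then
    (st.1 ++ [term], addToList)
  else (st.1, addToList)

def check_first_four_characters (terms : List String) : List String :=
  (terms.foldl pvAStep ([], true)).1

-- ===== PORT B =====
-- _split_at_toggle: (run of non-toggle terms, remainder starting at the first toggle)
def pvIsToggle (t : String) : Bool :=
  decide (PySem.Str.slice t none (some 4) = "do()") || decide (PySem.Str.slice t none (some 5) = "don't")

def pvSplitAtToggle : List String → List String × List String
  | [] => ([], [])
  | t :: ts =>
    if pvIsToggle t then ([], t :: ts)
    else ((pvSplitAtToggle ts).1.cons t, (pvSplitAtToggle ts).2)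

-- needed by pvGo's termination: the remainder is no longer than the input
theorem pvSplit_snd_le (r : List String) : (pvSplitAtToggle r).2.length ≤ r.length := by
  induction r with
  | nil => simp [pvSplitAtToggle]
  | cons t ts ih =>
    simp only [pvSplitAtToggle]
    split_ifs <;> simp <;> omega

-- the while loop: take one segment, emit its mul terms when active, consume the toggle
def pvGo (out : List String) (active : Bool) (rest : List String) : List String :=
  let out' := if active then
      out ++ ((pvSplitAtToggle rest).1.filter fun t => decide (PySem.Str.slice t none (some 3) = "mul"))
    else out
  if h : (pvSplitAtToggle rest).2 = [] then out'
  else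
    pvGo out' (decide (PySem.Str.slice (pvSplitAtToggle rest).2.headI none (some 4) = "do()"))
      (pvSplitAtToggle rest).2.tail
termination_by rest.length
decreasing_by
  have hle := pvSplit_snd_le rest
  cases hr : (pvSplitAtToggle rest).2 with
  | nil => exact absurd hr h
  | cons a l =>
    rw [hr] at hle
    simp at hle ⊢
    omega

def check_first_four_characters_alt (terms : List String) : List String :=
  pvGo [] true terms

-- ===== PRECONDITION & SPEC =====
def Spec_check_first_four_characters (terms : List String) (out : List String) : Prop := out = check_first_four_characters_alt terms
instance (terms : List String) (out : List String) : Decidable (Spec_check_first_four_characters terms out) := by unfold Spec_check_first_four_characters; infer_instance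

-- ===== CLAIM =====
def Claim_equal_check_first_four_characters : Prop := ∀ (terms : List String), Dom_check_first_four_characters terms → Spec_check_first_four_characters terms (check_first_four_characters terms)

-- ===== LEMMAS AND PROOFS =====

theorem pvSliceToList (t : String) (k : Nat) :
    (PySem.Str.slice t none (some (k : Int))).toList = t.toList.take k := by
  simp [PySem.Str.toList_slice, PySem.List.slice_to_natCast]

theorem pvNotMul_of_do (t : String) (h : PySem.Str.slice t none (some 4) = "do()") :
    PySem.Str.slice t none (some 3) ≠ "mul" := by
  intro h3
  have e4 : t.toList.take 4 = "do()".toList := by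
    rw [← h]; exact_mod_cast (pvSliceToList t 4).symm
  have e3 : t.toList.take 3 = "mul".toList := by
    rw [← h3]; exact_mod_cast (pvSliceToList t 3).symm
  have key : List.take 3 "do()".toList = "mul".toList := by
    rw [← e4, List.take_take]
    norm_num [e3]
  exact absurd key (by decide)

theorem pvNotMul_of_dont (t : String) (h : PySem.Str.slice t none (some 5) = "don't") :
    PySem.Str.slice t none (some 3) ≠ "mul" := by
  intro h3
  have e5 : t.toList.take 5 = "don't".toList := by
    rw [← h]; exact_mod_cast (pvSliceToList t 5).symm
  have e3 : t.toList.take 3 = "mul".toList := by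
    rw [← h3]; exact_mod_cast (pvSliceToList t 3).symm
  have key : List.take 3 "don't".toList = "mul".toList := by
    rw [← e5, List.take_take]
    norm_num [e3]
  exact absurd key (by decide)

theorem pvNotDo_of_dont (t : String) (h : PySem.Str.slice t none (some 5) = "don't") :
    PySem.Str.slice t none (some 4) ≠ "do()" := by
  intro h4
  have e5 : t.toList.take 5 = "don't".toList := by
    rw [← h]; exact_mod_cast (pvSliceToList t 5).symm
  have e4 : t.toList.take 4 = "do()".toList := by
    rw [← h4]; exact_mod_cast (pvSliceToList t 4).symm
  have key : List.take 4 "don't".toList = "do()".toList := by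
    rw [← e5, List.take_take]
    norm_num [e4]
  exact absurd key (by decide)

-- one B-loop step on a non-toggle head folds into the out accumulator
theorem pvGo_cons_nontoggle (res : List String) (active : Bool) (t : String) (ts : List String)
    (hnt : pvIsToggle t = false) :
    pvGo res active (t :: ts)
      = pvGo (if PySem.Str.slice t none (some 3) = "mul" ∧ active = true then res ++ [t] else res)
          active ts := by
  have hsplit : pvSplitAtToggle (t :: ts)
      = (t :: (pvSplitAtToggle ts).1, (pvSplitAtToggle ts).2) := by
    simp [pvSplitAtToggle, hnt]
  conv_lhs => rw [pvGo]
  conv_rhs => rw [pvGo]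
  simp only [hsplit]
  by_cases h3 : PySem.Str.slice t none (some 3) = "mul" <;>
    cases active <;>
      simp [h3]

theorem pvMain (rest : List String) : ∀ (res : List String) (active : Bool),
    (rest.foldl pvAStep (res, active)).1 = pvGo res active rest := by
  induction rest with
  | nil =>
    intro res active
    rw [pvGo]
    simp [pvSplitAtToggle]
  | cons t ts ih =>
    intro res active
    by_cases htog : pvIsToggle t = true
    · -- toggle head: A does not append (a toggle never starts with "mul"), both update active
      have hcases : PySem.Str.slice t none (some 4) = "do()" ∨
          PySem.Str.slice t none (some 5) = "don't" := by
        simpa [pvIsToggle] using htog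
      have hsplit : pvSplitAtToggle (t :: ts) = ([], t :: ts) := by
        simp [pvSplitAtToggle, htog]
      have hnm : PySem.Str.slice t none (some 3) ≠ "mul" := by
        rcases hcases with h | h
        · exact pvNotMul_of_do t h
        · exact pvNotMul_of_dont t h
      rcases hcases with h4 | h5
      · have hstep : pvAStep (res, active) t = (res, true) := by
          simp [pvAStep, h4, hnm]
        rw [List.foldl_cons, hstep, ih res true]
        conv_rhs => rw [pvGo]
        simp [hsplit, h4]
      · have hnd : PySem.Str.slice t none (some 4) ≠ "do()" := pvNotDo_of_dont t h5
        have hstep : pvAStep (res, active) t = (res, false) := by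
          simp [pvAStep, hnd, h5, hnm]
        rw [List.foldl_cons, hstep, ih res false]
        conv_rhs => rw [pvGo]
        simp [hsplit, hnd]
    · -- non-toggle head: active unchanged, A appends iff mul ∧ active
      have hnt : pvIsToggle t = false := by simpa using htog
      have h4 : ¬ PySem.Str.slice t none (some 4) = "do()" := by
        intro h; simp [pvIsToggle, h] at hnt
      have h5 : ¬ PySem.Str.slice t none (some 5) = "don't" := by
        intro h; simp [pvIsToggle, h] at hnt
      rw [List.foldl_cons, pvGo_cons_nontoggle res active t ts hnt]
      have hstep : pvAStep (res, active) t
          = (if PySem.Str.slice t none (some 3) = "mul" ∧ active = true then res ++ [t] else res,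
             active) := by
        simp only [pvAStep, h4, if_false, h5]
        split_ifs <;> simp_all
      rw [hstep]
      exact ih _ active

-- ===== VERDICT =====
theorem check_first_four_characters_spec : Claim_equal_check_first_four_characters := by
  intro terms _
  unfold Spec_check_first_four_characters check_first_four_characters check_first_four_characters_alt
  exact pvMain terms [] true
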